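-- pv_equiv track=rewrite | github.com/milesfoot/comp110-22f-workspace | exercises/ex08/data_utils.py | count
-- ===== SOURCE A (Python) =====
-- def count(items: list[str]) -> dict[str, int]:
--     """Counting the frequency of a certain value!"""
--     new_dict = {}
--     sett = set()
--     for i in items:
--         if i in sett:
--             new_dict[i] = new_dict[i] + 1
--         else:
--             new_dict[i] = 1
--             sett.add(i)
--     return new_dict
-- ===== SOURCE B (Python) =====
-- def count(items: list[str]) -> dict[str, int]:
--     """Counting the frequency of a certain value!"""
--     return {u: items.count(u) for u in dict.fromkeys(items)}
-- ===== Notes on version B (the rewrite author's own statement) =====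
-- stated objective: simpler
-- what changed: Replaces the single incremental pass maintaining a dict and a seen-set with a one-liner that dedups the keys first (dict.fromkeys) and tallies each distinct key by a full list.count rescan.
import Mathlib
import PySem

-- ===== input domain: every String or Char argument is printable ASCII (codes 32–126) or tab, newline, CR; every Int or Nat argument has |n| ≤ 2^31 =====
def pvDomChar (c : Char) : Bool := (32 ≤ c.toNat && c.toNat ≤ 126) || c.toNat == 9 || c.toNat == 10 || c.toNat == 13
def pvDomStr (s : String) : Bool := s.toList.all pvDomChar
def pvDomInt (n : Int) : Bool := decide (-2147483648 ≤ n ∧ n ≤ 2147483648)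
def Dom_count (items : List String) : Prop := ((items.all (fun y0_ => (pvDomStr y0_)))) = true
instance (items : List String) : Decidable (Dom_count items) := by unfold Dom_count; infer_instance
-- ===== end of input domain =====

-- B replaces A's single incremental pass (counts dict + seen-set) with dedup-the-keys-first
-- plus one full list.count rescan per distinct key: simpler (a one-liner), not faster.

-- ===== PORT A =====
def count (items : List String) : List (String × Int) :=
  let res := items.foldl
    (fun (st : PySem.Dict String Int × PySem.Set String) i =>
      if PySem.Set.contains st.2 i then
        -- new_dict[i] = new_dict[i] + 1 : the key is present (i ∈ sett), so the .getD 0 default is never used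
        (st.1.insert i ((st.1.get? i).getD 0 + 1), st.2)
      else
        (st.1.insert i (1 : Int), PySem.Set.add st.2 i))
    (PySem.Dict.empty, PySem.Set.empty)
  res.1.items

-- ===== PORT B =====
def count_alt (items : List String) : List (String × Int) :=
  (PySem.List.dedup items).map (fun u => (u, (PySem.List.count items u : Int)))

-- ===== PRECONDITION & SPEC =====
def Spec_count (items : List String) (out : List (String × Int)) : Prop := out = count_alt items
instance (items : List String) (out : List (String × Int)) : Decidable (Spec_count items out) := by unfold Spec_count; infer_instance

-- ===== CLAIM (what is proved, stated in full; the proofs are below) =====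
def Claim_equal_count : Prop := ∀ (items : List String), Dom_count items → Spec_count items (count items)

-- ===== LEMMAS AND PROOFS =====

-- The loop state of A after processing the prefix `done`: the counts dict in
-- first-occurrence order, and the seen-set (= ordered dedup of `done`).
def pvState (done : List String) : PySem.Dict String Int × PySem.Set String :=
  (PySem.Dict.mk ((PySem.List.dedup done).map (fun u => (u, (done.count u : Int)))),
   PySem.List.dedup done)

theorem pv_find_map_self (f : String → Int) (l : List String) (i : String) (h : i ∈ l) :
    List.find? (fun p => p.1 == i) (l.map (fun u => (u, f u))) = some (i, f i) := by
  induction l with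
  | nil => cases h
  | cons u t ih =>
    by_cases hu : u = i
    · subst hu; simp
    · have h' : i ∈ t := by
        cases h with
        | head => exact absurd rfl hu
        | tail _ h2 => exact h2
      have hne : (u == i) = false := by simp [hu]
      simp [hne, ih h']

theorem pv_dedup_append_singleton (done : List String) (i : String) :
    PySem.List.dedup (done ++ [i]) = PySem.Set.add (PySem.List.dedup done) i := by
  simp [PySem.List.dedup, PySem.Set.ofList, List.foldl_append]

theorem pv_step (done : List String) (i : String) :
    (if PySem.Set.contains (pvState done).2 i then
        ((pvState done).1.insert i (((pvState done).1.get? i).getD 0 + 1), (pvState done).2)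
      else
        ((pvState done).1.insert i (1 : Int), PySem.Set.add (pvState done).2 i))
    = pvState (done ++ [i]) := by
  by_cases hmem : i ∈ done
  · have hded : i ∈ PySem.List.dedup done := (PySem.List.mem_dedup done i).2 hmem
    have hc : PySem.Set.contains (PySem.List.dedup done) i = true := by
      simpa [PySem.Set.contains] using hded
    have hdc : (PySem.Dict.mk ((PySem.List.dedup done).map
        (fun u => (u, (done.count u : Int))))).contains i = true := by
      unfold PySem.Dict.contains
      rw [show (PySem.Dict.mk ((PySem.List.dedup done).map
        (fun u => (u, (done.count u : Int))))).items = (PySem.List.dedup done).map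
        (fun u => (u, (done.count u : Int))) from rfl, List.any_map, List.any_eq_true]
      exact ⟨i, hded, by simp⟩
    have hget : (PySem.Dict.mk ((PySem.List.dedup done).map
        (fun u => (u, (done.count u : Int))))).get? i = some ((done.count i : Int)) := by
      unfold PySem.Dict.get?
      rw [show (PySem.Dict.mk ((PySem.List.dedup done).map
        (fun u => (u, (done.count u : Int))))).items = (PySem.List.dedup done).map
        (fun u => (u, (done.count u : Int))) from rfl, pv_find_map_self _ _ _ hded]
      rfl
    have hded2 : PySem.List.dedup (done ++ [i]) = PySem.List.dedup done := by
      rw [pv_dedup_append_singleton]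
      unfold PySem.Set.add
      rw [hc]
      simp
    simp only [pvState, hc, if_pos, hget, PySem.Dict.insert, hdc, Option.getD_some]
    rw [hded2]
    refine congrArg (fun l => (PySem.Dict.mk l, PySem.List.dedup done)) ?_
    rw [List.map_map]
    refine List.map_congr_left (fun u hu => ?_)
    by_cases hui : u = i
    · subst hui
      simp [List.count_append]
    · have h1 : (u == i) = false := by simp [hui]
      have h2 : ([i] : List String).count u = 0 := by
        simp [List.count_eq_zero, hui]
      simp [Function.comp, h1, List.count_append, h2]
  · have hded : i ∉ PySem.List.dedup done := fun h => hmem ((PySem.List.mem_dedup done i).1 h)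
    have hc : PySem.Set.contains (PySem.List.dedup done) i = false := by
      simpa [PySem.Set.contains] using hded
    have hdc : (PySem.Dict.mk ((PySem.List.dedup done).map
        (fun u => (u, (done.count u : Int))))).contains i = false := by
      unfold PySem.Dict.contains
      rw [show (PySem.Dict.mk ((PySem.List.dedup done).map
        (fun u => (u, (done.count u : Int))))).items = (PySem.List.dedup done).map
        (fun u => (u, (done.count u : Int))) from rfl, List.any_map, List.any_eq_false]
      intro u hu h
      exact hded ((eq_of_beq (h : (u == i) = true)) ▸ hu)
    have hadd : PySem.Set.add (PySem.List.dedup done) i = PySem.List.dedup done ++ [i] := by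
      unfold PySem.Set.add
      rw [hc]
      rfl
    have hded2 : PySem.List.dedup (done ++ [i]) = PySem.List.dedup done ++ [i] := by
      rw [pv_dedup_append_singleton, hadd]
    simp only [pvState, hc, Bool.false_eq_true, if_false, PySem.Dict.insert, hdc]
    rw [hded2, hadd]
    refine congrArg (fun l => (PySem.Dict.mk l, PySem.List.dedup done ++ [i])) ?_
    rw [List.map_append]
    congr 1
    · refine List.map_congr_left (fun u hu => ?_)
      have hu' : u ∈ done := (PySem.List.mem_dedup done u).1 hu
      have hui : u ≠ i := fun h => hmem (h ▸ hu')
      have h2 : ([i] : List String).count u = 0 := by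
        simp [List.count_eq_zero, hui]
      simp [List.count_append, h2]
    · have h0 : done.count i = 0 := List.count_eq_zero.2 hmem
      simp [List.count_append, h0]

theorem pv_loop (rest done : List String) :
    rest.foldl
      (fun (st : PySem.Dict String Int × PySem.Set String) i =>
        if PySem.Set.contains st.2 i then
          (st.1.insert i ((st.1.get? i).getD 0 + 1), st.2)
        else
          (st.1.insert i (1 : Int), PySem.Set.add st.2 i))
      (pvState done)
    = pvState (done ++ rest) := by
  induction rest generalizing done with
  | nil => simp
  | cons i t ih =>
    rw [List.foldl_cons, pv_step done i, ih (done ++ [i])]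
    simp

-- ===== VERDICT (by name: the statement is the Claim_ definition above) =====
theorem count_spec : Claim_equal_count := by
  intro items _
  show count items = count_alt items
  have h0 : ((PySem.Dict.empty, PySem.Set.empty) : PySem.Dict String Int × PySem.Set String)
      = pvState [] := rfl
  unfold count count_alt
  rw [h0, pv_loop]
  simp [pvState, PySem.List.count_eq]
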